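-- pv_equiv track=rewrite | github.com/BatiDyDx/LCC | prog2/tp-final/src/sopa_letras.py | modificar_sopa
-- ===== SOURCE A (Python) =====
-- def modificar_sopa(sopa, pos, dir, palabra, intersecar_palabras):
--     """
--     modificar_sopa: Sopa Tuple(Int, Int) Direccion Str Bool -> Tuple(Bool, Sopa)
--
--     Toma una sopa, una posicion, direccion y palabra, y un booleano que indica la posibilidad de
--     que las palabras se intersequen en la sopa. Se intenta colocar la palabra dada
--     en la sopa iniciando en la posicion y en la direccion dada. Si se puede,
--     retorna una tupla con un True, y la nueva sopa. Si no se puede insertar la palabra,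
--     retorna una tupla con un primer elemento False y la sopa original.
--
--     Ejemplo:
--
--     Entrada:
--     [["t", "e", "l", "a"],
--     ["_", "e", "_", "_"],
--     ["d", "_", "_", "_"],
--     ["_", "_", "_", "_"]],
--     (3, 0), (0, 1), "agua", True)
--
--     Salida:
--     (True, [["t", "e", "l", "a"],
--             ["_", "e", "_", "g"],
--             ["d", "_", "_", "u"],
--             ["_", "_", "_", "a"]])
--
--     """
--     # Creamos una copia para no modificar la original
--     copia = copiar_sopa(sopa)
--     dim = len(sopa)
--
--     for i in range(len(palabra)):
--         x = pos[0] + dir[0] * i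
--         y = pos[1] + dir[1] * i
--         # Comprobamos que la posicion este dentro de la sopa
--         if 0 <= x < dim and 0 <= y < dim:
--             # Si la posicion no esta ocupada, o si se esta permitido
--             # que las palabras se intersequen y el caracter a posicionar
--             # es el mismo que se encuentra en la posicion, escribimos el
--             # a la copia
--             if sopa[y][x] == '_' or (intersecar_palabras and palabra[i] == sopa[y][x]):
--                 copia[y][x] = palabra[i]
--                 continue
--         # Si no se ha podido modificar la sopa, retornamos
--         # la sopa original
--         return (False, sopa)
--
--     return (True, copia)
--
-- def copiar_sopa(sopa):
--     """
--     copiar_sopa: Sopa -> Sopa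
--     Toma una sopa y retorna una copia, para poder
--     modificar la copia sin modificar la original
--     """
--     copia = []
--     # Iteramos sobre las filas
--     for fila in sopa:
--         # Agregamos a copia una copia de la fila
--         copia.append(fila[:])
--     return copia
-- ===== SOURCE B (Python) =====
-- def modificar_sopa(sopa, pos, dir, palabra, intersecar_palabras):
--     # Check pass: validate every position first; on failure return the original
--     # sopa without ever building a copy.
--     dim = len(sopa)
--     for i in range(len(palabra)):
--         x = pos[0] + dir[0] * i
--         y = pos[1] + dir[1] * i
--         if not (0 <= x < dim and 0 <= y < dim):
--             return (False, sopa)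
--         celda = sopa[y][x]
--         if celda != '_' and not (intersecar_palabras and palabra[i] == celda):
--             return (False, sopa)
--     # Apply pass: all positions are valid, copy the grid and write the word.
--     copia = [fila[:] for fila in sopa]
--     for i in range(len(palabra)):
--         copia[pos[1] + dir[1] * i][pos[0] + dir[0] * i] = palabra[i]
--     return (True, copia)
-- ===== Notes on version B (the rewrite author's own statement) =====
-- stated objective: alternative
-- what changed: A interleaves copying, per-character validation and writing in one loop with early aborts; B runs a pure validation pass first and only on success builds the copy and runs a separate write pass, so failure paths never copy the grid.
import Mathlib
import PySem

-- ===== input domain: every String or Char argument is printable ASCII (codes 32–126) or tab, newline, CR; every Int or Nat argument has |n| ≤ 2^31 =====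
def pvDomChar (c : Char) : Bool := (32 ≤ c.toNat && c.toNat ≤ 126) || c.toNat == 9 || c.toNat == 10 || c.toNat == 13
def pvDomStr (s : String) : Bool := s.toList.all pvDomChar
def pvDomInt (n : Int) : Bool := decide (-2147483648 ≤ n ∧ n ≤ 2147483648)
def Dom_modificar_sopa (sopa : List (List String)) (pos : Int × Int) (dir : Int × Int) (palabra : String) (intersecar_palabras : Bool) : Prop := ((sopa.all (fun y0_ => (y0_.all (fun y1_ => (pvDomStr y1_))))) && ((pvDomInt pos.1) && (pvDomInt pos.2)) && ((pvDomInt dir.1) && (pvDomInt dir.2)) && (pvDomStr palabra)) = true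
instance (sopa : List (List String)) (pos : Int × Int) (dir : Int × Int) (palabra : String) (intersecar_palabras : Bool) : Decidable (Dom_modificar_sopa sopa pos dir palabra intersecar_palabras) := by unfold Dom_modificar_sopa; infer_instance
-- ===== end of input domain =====

-- B splits A's interleaved copy-then-write-or-abort loop into a pure validation
-- pass followed by a write pass, copying the grid only when the word fits
-- (objective: alternative decomposition; failure paths avoid the copy).

-- shared helpers: sopa[y][x] read and copia[y][x] = v write; exact wherever the
-- Python index succeeds (the guards / Pre_ ensure the defaults are never hit)
def cellAt (sopa : List (List String)) (y x : Int) : String :=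
  PySem.List.pyGetD (PySem.List.pyGetD sopa y []) x ""

def setCell (g : List (List String)) (y x : Int) (v : String) : List (List String) :=
  PySem.List.pySetD g y (PySem.List.pySetD (PySem.List.pyGetD g y []) x v)

-- ===== PORT A =====
def copiar_sopa (sopa : List (List String)) : List (List String) :=
  sopa.foldl (fun copia fila => copia ++ [fila]) []

-- the 'for i in range(len(palabra))' loop of A, with early returns
def msLoopA (sopa : List (List String)) (pos : Int × Int) (dir : Int × Int)
    (w : List Char) (inter : Bool) (dim : Int) (i : Nat) (copia : List (List String)) :
    Bool × List (List String) :=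
  if _h : i < w.length then
    let x : Int := pos.1 + dir.1 * (i : Int)
    let y : Int := pos.2 + dir.2 * (i : Int)
    if 0 ≤ x ∧ x < dim ∧ 0 ≤ y ∧ y < dim then
      if cellAt sopa y x = "_" ∨ (inter = true ∧ String.ofList [w.getD i ' '] = cellAt sopa y x) then
        msLoopA sopa pos dir w inter dim (i + 1) (setCell copia y x (String.ofList [w.getD i ' ']))
      else (false, sopa)
    else (false, sopa)
  else (true, copia)
termination_by w.length - i

def modificar_sopa (sopa : List (List String)) (pos : Int × Int) (dir : Int × Int)
    (palabra : String) (intersecar_palabras : Bool) : Bool × List (List String) :=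
  msLoopA sopa pos dir palabra.toList intersecar_palabras (sopa.length : Int) 0 (copiar_sopa sopa)

-- ===== PORT B =====
-- B's validation pass: every position in bounds and writable
def msCheck (sopa : List (List String)) (pos : Int × Int) (dir : Int × Int)
    (w : List Char) (inter : Bool) (dim : Int) (i : Nat) : Bool :=
  if _h : i < w.length then
    let x : Int := pos.1 + dir.1 * (i : Int)
    let y : Int := pos.2 + dir.2 * (i : Int)
    if ¬ (0 ≤ x ∧ x < dim ∧ 0 ≤ y ∧ y < dim) then false
    else if cellAt sopa y x ≠ "_" ∧ ¬ (inter = true ∧ String.ofList [w.getD i ' '] = cellAt sopa y x) then false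
    else msCheck sopa pos dir w inter dim (i + 1)
  else true
termination_by w.length - i

-- B's write pass over the fresh copy
def msWrite (pos : Int × Int) (dir : Int × Int) (w : List Char) (i : Nat)
    (copia : List (List String)) : List (List String) :=
  if _h : i < w.length then
    msWrite pos dir w (i + 1)
      (setCell copia (pos.2 + dir.2 * (i : Int)) (pos.1 + dir.1 * (i : Int)) (String.ofList [w.getD i ' ']))
  else copia
termination_by w.length - i

def modificar_sopa_alt (sopa : List (List String)) (pos : Int × Int) (dir : Int × Int)
    (palabra : String) (intersecar_palabras : Bool) : Bool × List (List String) :=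
  if msCheck sopa pos dir palabra.toList intersecar_palabras (sopa.length : Int) 0 then
    (true, msWrite pos dir palabra.toList 0 (sopa.map (fun fila => fila)))
  else (false, sopa)

-- ===== PRECONDITION & SPEC =====
-- Pre_ excludes exactly the inputs on which the Python A raises IndexError (a ragged
-- grid: some step i lies inside the dim×dim square but past the end of its short row,
-- while every earlier step placed its character successfully); A returns on all other inputs.
def Pre_modificar_sopa (sopa : List (List String)) (pos : Int × Int) (dir : Int × Int) (palabra : String) (intersecar_palabras : Bool) : Prop :=
  ∀ i : Nat, i < palabra.toList.length →
    (∀ j : Nat, j < i →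
      (0 ≤ pos.1 + dir.1 * (j : Int) ∧ pos.1 + dir.1 * (j : Int) < (sopa.length : Int) ∧
       0 ≤ pos.2 + dir.2 * (j : Int) ∧ pos.2 + dir.2 * (j : Int) < (sopa.length : Int)) ∧
      pos.1 + dir.1 * (j : Int) < ((PySem.List.pyGetD sopa (pos.2 + dir.2 * (j : Int)) []).length : Int) ∧
      (cellAt sopa (pos.2 + dir.2 * (j : Int)) (pos.1 + dir.1 * (j : Int)) = "_" ∨
       (intersecar_palabras = true ∧ String.ofList [palabra.toList.getD j ' '] = cellAt sopa (pos.2 + dir.2 * (j : Int)) (pos.1 + dir.1 * (j : Int))))) →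
    (0 ≤ pos.1 + dir.1 * (i : Int) ∧ pos.1 + dir.1 * (i : Int) < (sopa.length : Int) ∧
     0 ≤ pos.2 + dir.2 * (i : Int) ∧ pos.2 + dir.2 * (i : Int) < (sopa.length : Int)) →
    pos.1 + dir.1 * (i : Int) < ((PySem.List.pyGetD sopa (pos.2 + dir.2 * (i : Int)) []).length : Int)
instance (sopa : List (List String)) (pos : Int × Int) (dir : Int × Int) (palabra : String) (intersecar_palabras : Bool) : Decidable (Pre_modificar_sopa sopa pos dir palabra intersecar_palabras) := by unfold Pre_modificar_sopa; infer_instance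

def pvWitness_modificar_sopa : List (List String) × (Int × Int) × (Int × Int) × String × Bool :=
  ([["_", "_"], ["_", "_"]], (0, 0), (1, 0), "ab", false)

def Spec_modificar_sopa (sopa : List (List String)) (pos : Int × Int) (dir : Int × Int) (palabra : String) (intersecar_palabras : Bool) (out : Bool × List (List String)) : Prop := out = modificar_sopa_alt sopa pos dir palabra intersecar_palabras
instance (sopa : List (List String)) (pos : Int × Int) (dir : Int × Int) (palabra : String) (intersecar_palabras : Bool) (out : Bool × List (List String)) : Decidable (Spec_modificar_sopa sopa pos dir palabra intersecar_palabras out) := by unfold Spec_modificar_sopa; infer_instance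

-- ===== CLAIM (what is proved, stated in full; the proofs are below) =====
def Claim_equal_modificar_sopa : Prop := ∀ (sopa : List (List String)) (pos : Int × Int) (dir : Int × Int) (palabra : String) (intersecar_palabras : Bool), Dom_modificar_sopa sopa pos dir palabra intersecar_palabras → Pre_modificar_sopa sopa pos dir palabra intersecar_palabras → Spec_modificar_sopa sopa pos dir palabra intersecar_palabras (modificar_sopa sopa pos dir palabra intersecar_palabras)

-- ===== LEMMAS AND PROOFS =====

-- A's interleaved loop equals B's check pass followed by B's write pass
lemma msLoopA_eq_check_write (sopa : List (List String)) (pos dir : Int × Int)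
    (w : List Char) (inter : Bool) (dim : Int) :
    ∀ n i copia, w.length - i ≤ n →
      msLoopA sopa pos dir w inter dim i copia
        = if msCheck sopa pos dir w inter dim i then (true, msWrite pos dir w i copia)
          else (false, sopa) := by
  intro n
  induction n with
  | zero =>
    intro i copia h
    have hi : ¬ i < w.length := by omega
    rw [msLoopA, msCheck, msWrite]
    simp [hi]
  | succ n ih =>
    intro i copia h
    by_cases hi : i < w.length
    · rw [msLoopA, msCheck, msWrite]
      simp only [hi, dif_pos]
      by_cases hb : 0 ≤ pos.1 + dir.1 * (i : Int) ∧ pos.1 + dir.1 * (i : Int) < dim ∧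
          0 ≤ pos.2 + dir.2 * (i : Int) ∧ pos.2 + dir.2 * (i : Int) < dim
      · rw [if_pos hb, if_neg (not_not_intro hb)]
        by_cases hok : cellAt sopa (pos.2 + dir.2 * (i : Int)) (pos.1 + dir.1 * (i : Int)) = "_" ∨
            (inter = true ∧ String.ofList [w.getD i ' ']
              = cellAt sopa (pos.2 + dir.2 * (i : Int)) (pos.1 + dir.1 * (i : Int)))
        · rw [if_pos hok, if_neg (by tauto :
            ¬ (cellAt sopa (pos.2 + dir.2 * (i : Int)) (pos.1 + dir.1 * (i : Int)) ≠ "_" ∧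
               ¬ (inter = true ∧ String.ofList [w.getD i ' ']
                  = cellAt sopa (pos.2 + dir.2 * (i : Int)) (pos.1 + dir.1 * (i : Int)))))]
          exact ih (i + 1) _ (by omega)
        · rw [if_neg hok, if_pos (by tauto :
            cellAt sopa (pos.2 + dir.2 * (i : Int)) (pos.1 + dir.1 * (i : Int)) ≠ "_" ∧
               ¬ (inter = true ∧ String.ofList [w.getD i ' ']
                  = cellAt sopa (pos.2 + dir.2 * (i : Int)) (pos.1 + dir.1 * (i : Int))))]
          simp
      · rw [if_neg hb, if_pos (by tauto : ¬ (0 ≤ pos.1 + dir.1 * (i : Int) ∧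
          pos.1 + dir.1 * (i : Int) < dim ∧ 0 ≤ pos.2 + dir.2 * (i : Int) ∧
          pos.2 + dir.2 * (i : Int) < dim))]
        simp
    · rw [msLoopA, msCheck, msWrite]
      simp [hi]

-- A's row-append copy is the identity on the list of rows
lemma copiar_sopa_eq (sopa : List (List String)) : copiar_sopa sopa = sopa := by
  simpa [copiar_sopa] using PySem.List.foldl_append_singleton sopa ([] : List (List String))

-- ===== VERDICT (by name: the statement is the Claim_ definition above) =====
theorem modificar_sopa_spec : Claim_equal_modificar_sopa := by
  intro sopa pos dir palabra inter _hDom _hPre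
  unfold Spec_modificar_sopa modificar_sopa modificar_sopa_alt
  rw [copiar_sopa_eq,
    msLoopA_eq_check_write sopa pos dir palabra.toList inter (sopa.length : Int)
      palabra.toList.length 0 sopa (by omega)]
  simp [List.map_id']
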